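-- pv_equiv track=rewrite | github.com/JosephMichaelSale/datamapy | datamapy/access.py | _get_region_for_point
-- ===== SOURCE A (Python) =====
-- def _get_region_for_point(point,dimension,region_dimension):
-- 	region = 0
-- 	for i in range(len(point)):
-- 		coordinate_contribution = point[i]//region_dimension[i]
-- 		for j in range(i):
-- 			coordinate_contribution *= dimension[j]//region_dimension[j]
-- 		region += coordinate_contribution
-- 	return region
-- ===== SOURCE B (Python) =====
-- def _get_region_for_point(point, dimension, region_dimension):
--     region = 0
--     prod = 1
--     for i, p in enumerate(point):
--         if i > 0:
--             prod *= dimension[i - 1] // region_dimension[i - 1]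
--         region += (p // region_dimension[i]) * prod
--     return region
-- ===== Notes on version B (the rewrite author's own statement) =====
-- stated objective: faster
-- what changed: Replaces the nested loop that recomputes the prefix product of dimension[j]//region_dimension[j] for every coordinate with a single pass that maintains the running prefix product.
import Mathlib
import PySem

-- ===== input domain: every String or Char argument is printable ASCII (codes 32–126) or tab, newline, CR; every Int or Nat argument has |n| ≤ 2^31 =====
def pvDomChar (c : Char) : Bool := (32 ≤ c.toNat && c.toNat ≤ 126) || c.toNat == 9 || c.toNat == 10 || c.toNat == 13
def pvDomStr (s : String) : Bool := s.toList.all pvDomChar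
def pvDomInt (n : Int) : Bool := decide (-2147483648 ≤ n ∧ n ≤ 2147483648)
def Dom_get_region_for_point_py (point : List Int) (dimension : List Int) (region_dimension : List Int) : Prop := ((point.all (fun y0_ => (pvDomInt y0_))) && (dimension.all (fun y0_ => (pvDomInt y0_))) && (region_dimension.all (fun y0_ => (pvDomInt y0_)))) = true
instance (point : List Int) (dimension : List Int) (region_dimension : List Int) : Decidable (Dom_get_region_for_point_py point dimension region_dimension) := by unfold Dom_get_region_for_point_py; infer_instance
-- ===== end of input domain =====

-- B replaces A's nested loop (which recomputes the prefix product of dimension[j]//region_dimension[j]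
-- for every coordinate, O(n^2)) by a single pass maintaining the running prefix product (O(n)).

-- ===== PORT A =====
-- literal transliteration of A: outer loop over range(len(point)), inner loop over range(i)
def get_region_for_point_py (point : List Int) (dimension : List Int) (region_dimension : List Int) : Int :=
  (List.range point.length).foldl
    (fun (region : Int) (i : Nat) =>
      region +
        (List.range i).foldl
          (fun (c : Int) (j : Nat) => c * PySem.Int.floordiv (PySem.List.pyGetD dimension (j : Int) 0)
                            (PySem.List.pyGetD region_dimension (j : Int) 0))
          (PySem.Int.floordiv (PySem.List.pyGetD point (i : Int) 0)
            (PySem.List.pyGetD region_dimension (i : Int) 0)))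
    0

-- ===== PORT B =====
-- literal transliteration of B: one pass over enumerate(point), state (region, prod)
def get_region_for_point_py_alt (point : List Int) (dimension : List Int) (region_dimension : List Int) : Int :=
  ((PySem.List.enumerate point 0).foldl
    (fun (st : Int × Int) ip =>
      let prod :=
        if 0 < ip.1 then
          st.2 * PySem.Int.floordiv (PySem.List.pyGetD dimension (ip.1 - 1) 0)
                   (PySem.List.pyGetD region_dimension (ip.1 - 1) 0)
        else st.2
      (st.1 + PySem.Int.floordiv ip.2 (PySem.List.pyGetD region_dimension ip.1 0) * prod, prod))
    (0, 1)).1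

-- ===== PRECONDITION & SPEC =====
-- Exactly where Python A returns: indices 0..len(point)-1 into region_dimension (and 0..len(point)-2
-- into dimension) exist, and those region_dimension entries are nonzero (else ZeroDivisionError).
def Pre_get_region_for_point_py (point : List Int) (dimension : List Int) (region_dimension : List Int) : Prop :=
  point.length ≤ region_dimension.length ∧ point.length ≤ dimension.length + 1 ∧
    ∀ x ∈ region_dimension.take point.length, x ≠ 0
instance (point : List Int) (dimension : List Int) (region_dimension : List Int) : Decidable (Pre_get_region_for_point_py point dimension region_dimension) := by unfold Pre_get_region_for_point_py; infer_instance

def pvWitness_get_region_for_point_py : List Int × List Int × List Int := ([5, 7, 9], [10, 10, 10], [2, 3, 4])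

def Spec_get_region_for_point_py (point : List Int) (dimension : List Int) (region_dimension : List Int) (out : Int) : Prop := out = get_region_for_point_py_alt point dimension region_dimension
instance (point : List Int) (dimension : List Int) (region_dimension : List Int) (out : Int) : Decidable (Spec_get_region_for_point_py point dimension region_dimension out) := by unfold Spec_get_region_for_point_py; infer_instance

-- ===== CLAIM (what is proved, stated in full; the proofs are below) =====
def Claim_equal_get_region_for_point_py : Prop := ∀ (point : List Int) (dimension : List Int) (region_dimension : List Int), Dom_get_region_for_point_py point dimension region_dimension → Pre_get_region_for_point_py point dimension region_dimension → Spec_get_region_for_point_py point dimension region_dimension (get_region_for_point_py point dimension region_dimension)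

-- ===== LEMMAS AND PROOFS =====

-- the per-index ratio dimension[j] // region_dimension[j]
def pvF (dimension region_dimension : List Int) (j : Nat) : Int :=
  PySem.Int.floordiv (PySem.List.pyGetD dimension (j : Int) 0) (PySem.List.pyGetD region_dimension (j : Int) 0)

lemma foldl_mul_eq_mul_prod (g : Nat → Int) (n : Nat) (c0 : Int) :
    (List.range n).foldl (fun c j => c * g j) c0 = c0 * ((List.range n).map g).prod := by
  induction n generalizing c0 with
  | zero => simp
  | succ n ih => simp [List.range_succ, List.foldl_append, ih, mul_assoc]

lemma foldl_congr' {α β : Type} (l : List β) (f g : α → β → α) (init : α)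
    (h : ∀ acc x, x ∈ l → f acc x = g acc x) : l.foldl f init = l.foldl g init := by
  induction l generalizing init with
  | nil => rfl
  | cons a t ih =>
    simp only [List.foldl_cons]
    rw [h init a (List.mem_cons_self ..)]
    exact ih _ fun acc x hx => h acc x (List.mem_cons_of_mem _ hx)

lemma A_append (point dimension region_dimension : List Int) (x : Int) :
    get_region_for_point_py (point ++ [x]) dimension region_dimension =
      get_region_for_point_py point dimension region_dimension +
        PySem.Int.floordiv x (PySem.List.pyGetD region_dimension (point.length : Int) 0) *
          ((List.range point.length).map (pvF dimension region_dimension)).prod := by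
  unfold get_region_for_point_py
  rw [show (point ++ [x]).length = point.length + 1 by simp,
    List.range_succ, List.foldl_append]
  have hlast : PySem.List.pyGetD (point ++ [x]) (point.length : Int) 0 = x := by
    simp [PySem.List.pyGetD_natCast, List.getD]
  have hcongr :
      (List.range point.length).foldl
        (fun (region : Int) (i : Nat) =>
          region + (List.range i).foldl
            (fun (c : Int) (j : Nat) => c * PySem.Int.floordiv (PySem.List.pyGetD dimension (j : Int) 0)
                  (PySem.List.pyGetD region_dimension (j : Int) 0))
            (PySem.Int.floordiv (PySem.List.pyGetD (point ++ [x]) (i : Int) 0)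
              (PySem.List.pyGetD region_dimension (i : Int) 0))) 0 =
      (List.range point.length).foldl
        (fun (region : Int) (i : Nat) =>
          region + (List.range i).foldl
            (fun (c : Int) (j : Nat) => c * PySem.Int.floordiv (PySem.List.pyGetD dimension (j : Int) 0)
                  (PySem.List.pyGetD region_dimension (j : Int) 0))
            (PySem.Int.floordiv (PySem.List.pyGetD point (i : Int) 0)
              (PySem.List.pyGetD region_dimension (i : Int) 0))) 0 := by
    apply foldl_congr'
    intro acc i hi
    have hi' : i < point.length := List.mem_range.mp hi
    have : PySem.List.pyGetD (point ++ [x]) (i : Int) 0 = PySem.List.pyGetD point (i : Int) 0 := by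
      simp [PySem.List.pyGetD_natCast, List.getD, List.getElem?_append_left hi']
    rw [this]
  simp only [List.foldl_cons, List.foldl_nil, hcongr, hlast]
  rw [foldl_mul_eq_mul_prod]
  rfl

lemma B_pair (point dimension region_dimension : List Int) :
    (PySem.List.enumerate point 0).foldl
      (fun (st : Int × Int) ip =>
        let prod :=
          if 0 < ip.1 then
            st.2 * PySem.Int.floordiv (PySem.List.pyGetD dimension (ip.1 - 1) 0)
                     (PySem.List.pyGetD region_dimension (ip.1 - 1) 0)
          else st.2
        (st.1 + PySem.Int.floordiv ip.2 (PySem.List.pyGetD region_dimension ip.1 0) * prod, prod))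
      (0, 1) =
    (get_region_for_point_py point dimension region_dimension,
     ((List.range (point.length - 1)).map (pvF dimension region_dimension)).prod) := by
  induction point using List.reverseRecOn with
  | nil => simp [PySem.List.enumerate, get_region_for_point_py]
  | append_singleton l x ih =>
    rw [PySem.List.enumerate_append, List.foldl_append, ih]
    have hx : PySem.List.enumerate [x] ((0 : Int) + l.length) = [((l.length : Int), x)] := by
      simp [PySem.List.enumerate_cons, PySem.List.enumerate_nil]
    rw [hx]
    simp only [List.foldl_cons, List.foldl_nil]
    rw [A_append]
    rcases Nat.eq_zero_or_pos l.length with h0 | hpos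
    · simp [h0]
    · have hcond : (0 : Int) < (l.length : Int) := by exact_mod_cast hpos
      have hcast : ((l.length : Int) - 1) = ((l.length - 1 : Nat) : Int) := by
        omega
      have hprod : ((List.range (l.length - 1)).map (pvF dimension region_dimension)).prod *
          PySem.Int.floordiv (PySem.List.pyGetD dimension ((l.length : Int) - 1) 0)
            (PySem.List.pyGetD region_dimension ((l.length : Int) - 1) 0) =
          ((List.range l.length).map (pvF dimension region_dimension)).prod := by
        conv_rhs => rw [show l.length = (l.length - 1) + 1 from (Nat.succ_pred_eq_of_pos hpos).symm]
        rw [List.range_succ]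
        simp [pvF, hcast]
      simp only [if_pos hcond, hprod]
      simp

-- ===== VERDICT (by name: the statement is the Claim_ definition above) =====
theorem get_region_for_point_py_spec : Claim_equal_get_region_for_point_py := by
  intro point dimension region_dimension _ _
  unfold Spec_get_region_for_point_py get_region_for_point_py_alt
  rw [B_pair]
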